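-- pv_equiv track=rewrite | github.com/0417taehyun/Algorithm | LeetCode/Python/1_Easy/2229.py | another_solution
-- ===== SOURCE A (Python) =====
-- def another_solution(nums: list[int]) -> bool:
--     x, n, unique_nums = min(nums), len(nums), set(nums)
--     if len(unique_nums) == n:
--         for number in nums:
--             if number < x or number > (x + n - 1):
--                 return False
--         return True
--
--     else:
--         return False
-- ===== SOURCE B (Python) =====
-- def another_solution(nums: list[int]) -> bool:
--     s = sorted(nums)
--     return all(b - a == 1 for a, b in zip(s, s[1:]))
-- ===== Notes on version B (the rewrite author's own statement) =====
-- stated objective: alternative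
-- what changed: Replaces A's set-based distinctness test plus per-element min-bound scan with sort-then-scan: sort the list and check every adjacent pair differs by exactly 1 (duplicates fail the diff test, so no set is needed). Pre_ excludes only the empty list, where A raises ValueError.
import Mathlib
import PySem

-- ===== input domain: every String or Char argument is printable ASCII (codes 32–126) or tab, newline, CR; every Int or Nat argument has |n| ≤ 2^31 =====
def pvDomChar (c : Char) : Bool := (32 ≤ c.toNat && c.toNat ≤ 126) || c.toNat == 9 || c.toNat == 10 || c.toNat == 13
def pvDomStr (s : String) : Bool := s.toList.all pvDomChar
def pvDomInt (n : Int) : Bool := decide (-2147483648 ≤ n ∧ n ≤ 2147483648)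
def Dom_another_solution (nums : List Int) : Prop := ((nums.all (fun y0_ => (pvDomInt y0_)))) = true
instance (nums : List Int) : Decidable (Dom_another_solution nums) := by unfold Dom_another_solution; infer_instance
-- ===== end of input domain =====

-- B replaces A's set-based distinctness test + per-element bound scan with
-- sort-then-scan: sort the list and check every adjacent pair differs by exactly 1.


-- ===== PORT A =====
def another_solution (nums : List Int) : Bool :=
  -- x, n, unique_nums = min(nums), len(nums), set(nums); min([]) raises (outside Pre_)
  match PySem.List.min? nums (fun y => y) with
  | none => false
  | some x =>
    let n : Int := nums.length
    let unique_nums : PySem.Set Int := PySem.Set.ofList nums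
    if PySem.Set.len unique_nums = n then
      -- for number in nums: if number < x or number > (x + n - 1): return False / return True
      nums.all (fun number => !(decide (number < x) || decide (x + n - 1 < number)))
    else false

-- ===== PORT B =====
def another_solution_alt (nums : List Int) : Bool :=
  -- s = sorted(nums); all(b - a == 1 for a, b in zip(s, s[1:]))
  let s := PySem.List.sorted nums (fun y => y) false
  (s.zip (s.drop 1)).all (fun p => decide (p.2 - p.1 = 1))

-- ===== PRECONDITION & SPEC =====
-- Pre_ excludes only the empty list, on which A raises ValueError (min of empty sequence).
def Pre_another_solution (nums : List Int) : Prop := nums ≠ []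
instance (nums : List Int) : Decidable (Pre_another_solution nums) := by unfold Pre_another_solution; infer_instance
def pvWitness_another_solution : List Int := ([1, 3, 2])
def Spec_another_solution (nums : List Int) (out : Bool) : Prop := out = another_solution_alt nums
instance (nums : List Int) (out : Bool) : Decidable (Spec_another_solution nums out) := by unfold Spec_another_solution; infer_instance

-- ===== CLAIM (what is proved, stated in full; the proofs are below) =====
def Claim_equal_another_solution : Prop := ∀ (nums : List Int), Dom_another_solution nums → Pre_another_solution nums → Spec_another_solution nums (another_solution nums)

-- ===== LEMMAS AND PROOFS =====

-- B's zip-adjacent scan, characterised by indices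
lemma zip_all_iff_adjacent (s : List Int) :
    ((s.zip (s.drop 1)).all (fun p => decide (p.2 - p.1 = 1)) = true) ↔
      ∀ i (h : i + 1 < s.length), s[i + 1] - s[i] = 1 := by
  induction s with
  | nil => simp
  | cons a t ih =>
    cases t with
    | nil => simp
    | cons b u =>
      simp only [List.drop_succ_cons, List.drop_zero, List.zip_cons_cons, List.all_cons,
        Bool.and_eq_true, decide_eq_true_eq, List.length_cons]
      rw [show List.drop 1 (b::u) = u from rfl] at ih
      rw [ih]
      constructor
      · rintro ⟨h1, h2⟩ i hi
        cases i with
        | zero => simpa using h1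
        | succ j => simpa using h2 j (by simpa using hi)
      · intro h
        refine ⟨by simpa using h 0 (by simp), fun j hj => ?_⟩
        simpa using h (j+1) (by simp at hj ⊢; omega)

-- a strictly increasing integer list grows at least by the index gap
lemma getElem_ge_of_strict (s : List Int)
    (hstep : ∀ i (h : i + 1 < s.length), s[i] < s[i + 1]) :
    ∀ i j (hij : i ≤ j) (hj : j < s.length), s[i]'(lt_of_le_of_lt (by omega) hj) + ((j : Int) - i) ≤ s[j] := by
  intro i j hij
  induction j, hij using Nat.le_induction with
  | base => intro hj; simp
  | succ j hij ih =>
    intro hj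
    have h1 := ih (by omega)
    have h2 := hstep j (by omega)
    push_cast at *
    omega

-- if every adjacent difference is 1 then s[k] = s[0] + k
lemma diffs_one_getElem (s : List Int)
    (h : ∀ i (hi : i + 1 < s.length), s[i + 1] - s[i] = 1) :
    ∀ k (hk : k < s.length), s[k] = s[0]'(by omega) + k := by
  intro k
  induction k with
  | zero => intro hk; simp
  | succ j ih =>
    intro hk
    have h1 := ih (by omega)
    have h2 := h j (by omega)
    push_cast at *
    omega

-- len(set(xs)) == len(xs) iff xs has no duplicates
lemma len_ofList_eq_iff_nodup (xs : List Int) :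
    (PySem.Set.ofList xs).length = xs.length ↔ xs.Nodup := by
  have hfin : (PySem.Set.ofList xs).toFinset = xs.toFinset := by
    ext a; simp [PySem.Set.mem_ofList]
  have hcard : (PySem.Set.ofList xs).toFinset.card = (PySem.Set.ofList xs).length :=
    List.toFinset_card_of_nodup (PySem.Set.nodup_ofList xs)
  constructor
  · intro h
    have : xs.toFinset.card = xs.length := by rw [← hfin, hcard, h]
    exact Multiset.toFinset_card_eq_card_iff_nodup.mp this
  · intro h
    have : xs.toFinset.card = xs.length := List.toFinset_card_of_nodup h
    rw [← hcard, hfin, this]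

-- ===== VERDICT (by name: the statement is the Claim_ definition above) =====
theorem another_solution_spec : Claim_equal_another_solution := by
  intro nums _ hne
  unfold Spec_another_solution another_solution another_solution_alt
  obtain ⟨mn, hmn⟩ : ∃ mn, PySem.List.min? nums (fun y => y) = some mn := by
    cases h : PySem.List.min? nums (fun y => y) with
    | none => exact absurd ((PySem.List.min?_eq_none_iff nums _).mp h) hne
    | some m => exact ⟨m, rfl⟩
  rw [hmn]
  simp only [PySem.Set.len]
  set s := PySem.List.sorted nums (fun y => y) false with hs
  have hperm : s.Perm nums := PySem.List.sorted_perm nums (fun y => y) false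
  have hlens : s.length = nums.length := hperm.length_eq
  have hnil : s ≠ [] := fun h0 =>
    hne ((PySem.List.sorted_eq_nil_iff nums (fun y => y) false).mp h0)
  have hpos : 0 < s.length := List.length_pos_of_ne_nil hnil
  have hmono : ∀ p q (hpq : p ≤ q) (hq : q < s.length),
      s[p]'(lt_of_le_of_lt hpq hq) ≤ s[q] := by
    intro p q hpq hq
    exact PySem.List.sorted_id_getElem_mono nums hpq (by simpa [hs] using hq)
  -- min(nums) = s[0]
  have h0mem : s[0]'hpos ∈ nums := hperm.mem_iff.mp (List.getElem_mem hpos)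
  have hmn_le : mn ≤ s[0]'hpos := PySem.List.min?_isMin hmn _ h0mem
  have hle_mn : s[0]'hpos ≤ mn := by
    obtain ⟨k, hk, hks⟩ := List.mem_iff_getElem.mp
      (hperm.mem_iff.mpr (PySem.List.min?_mem hmn))
    calc s[0]'hpos ≤ s[k] := hmono 0 k (Nat.zero_le k) hk
    _ = mn := hks
  have h0 : s[0]'hpos = mn := le_antisymm hle_mn hmn_le
  by_cases hlen : ((PySem.Set.ofList nums).length : Int) = (nums.length : Int)
  · have hnd : nums.Nodup := (len_ofList_eq_iff_nodup nums).mp (by exact_mod_cast hlen)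
    have hnds : s.Nodup := hperm.nodup_iff.mpr hnd
    have hstrict : ∀ i (h : i + 1 < s.length), s[i] < s[i + 1] := by
      intro i hi
      have hle := hmono i (i+1) (by omega) hi
      have hnei : s[i]'(by omega) ≠ s[i+1]'hi := by
        intro he
        have := (List.Nodup.getElem_inj_iff hnds).mp he
        omega
      exact lt_of_le_of_ne hle hnei
    rw [if_pos hlen]
    rcases Bool.eq_false_or_eq_true
        (nums.all (fun number => !(decide (number < mn) || decide (mn + (nums.length : Int) - 1 < number)))) with hall | hall
    · -- A's loop succeeded: every element lies in [mn, mn + n - 1]; diffs are forced to 1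
      rw [hall]
      symm
      rw [(zip_all_iff_adjacent s)]
      intro i hi
      simp only [List.all_eq_true, Bool.not_eq_true', Bool.or_eq_false_iff,
        decide_eq_false_iff_not, not_lt] at hall
      have hub : ∀ k (hk : k < s.length), s[k] ≤ mn + (nums.length : Int) - 1 := by
        intro k hk
        exact (hall s[k] (hperm.mem_iff.mp (List.getElem_mem hk))).2
      have hlow := getElem_ge_of_strict s hstrict 0 i (by omega) (by omega)
      have hstep := hstrict i hi
      have hhigh := getElem_ge_of_strict s hstrict (i+1) (s.length - 1) (by omega) (by omega)
      have hlast := hub (s.length - 1) (by omega)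
      rw [h0] at hlow
      have hcast : ((s.length - 1 : Nat) : Int) = (nums.length : Int) - 1 := by
        rw [← hlens]; omega
      rw [hcast] at hhigh
      omega
    · -- A's loop found a violating element; B must be false too
      rw [hall]
      simp only [List.all_eq_false] at hall
      obtain ⟨y, hy, hbad⟩ := hall
      have hylo := PySem.List.min?_isMin hmn y hy
      simp only at hylo
      have hyhi : mn + (nums.length : Int) - 1 < y := by
        simp at hbad
        omega
      symm
      rw [Bool.eq_false_iff]
      intro hzip
      have hdiff := (zip_all_iff_adjacent s).mp hzip
      obtain ⟨k, hk, hks⟩ := List.mem_iff_getElem.mp (hperm.mem_iff.mpr hy)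
      have := diffs_one_getElem s hdiff k hk
      rw [hks, h0] at this
      omega
  · -- duplicates: A is false, and so is B (a strict chain would force nodup)
    rw [if_neg hlen]
    symm
    rw [Bool.eq_false_iff]
    intro hzip
    have hdiff := (zip_all_iff_adjacent s).mp hzip
    have hstrict : ∀ i (h : i + 1 < s.length), s[i] < s[i + 1] := by
      intro i hi
      have := hdiff i hi
      omega
    have hnds : s.Nodup := by
      rw [List.nodup_iff_getElem?_ne_getElem?]
      intro i j hij hj
      have h1 := getElem_ge_of_strict s hstrict i j (by omega) hj
      have hlt : s[i]'(by omega) < s[j] := by omega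
      simp [hj, show i < s.length by omega]
      omega
    have := (len_ofList_eq_iff_nodup nums).mpr (hperm.nodup_iff.mp hnds)
    exact hlen (by exact_mod_cast this)
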